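-- pv_equiv track=rewrite | github.com/G9A2HvK9/AdventCode_Challenge_Python | 01.py | all_fuel
-- ===== SOURCE A (Python) =====
-- import math
--
-- def fuel_calculator(mass):
--   return math.floor(mass/3) - 2
--
-- def all_fuel(mass):
--   original = fuel_calculator(mass)
--   total = original
--   additional = fuel_calculator(original)
--
--   while additional > 0:
--     if additional > 0:
--       total += additional
--       additional = fuel_calculator(additional)
--     else:
--       total = total
--       additional = fuel_calculator(additional)
--
--   return total
-- ===== SOURCE B (Python) =====
-- def fuel_calculator(mass):
--   return mass // 3 - 2
--
-- def _rest(x):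
--   f = fuel_calculator(x)
--   return f + _rest(f) if f > 0 else 0
--
-- def all_fuel(mass):
--   original = fuel_calculator(mass)
--   return original + _rest(original)
-- ===== Notes on version B (the rewrite author's own statement) =====
-- stated objective: simpler
-- what changed: Replaces the while loop with dead else-branch by a recursive helper that threads the fuel-of-fuel recurrence (first term added unconditionally, later terms gated on > 0), using integer // instead of math.floor of a float division.
import Mathlib
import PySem

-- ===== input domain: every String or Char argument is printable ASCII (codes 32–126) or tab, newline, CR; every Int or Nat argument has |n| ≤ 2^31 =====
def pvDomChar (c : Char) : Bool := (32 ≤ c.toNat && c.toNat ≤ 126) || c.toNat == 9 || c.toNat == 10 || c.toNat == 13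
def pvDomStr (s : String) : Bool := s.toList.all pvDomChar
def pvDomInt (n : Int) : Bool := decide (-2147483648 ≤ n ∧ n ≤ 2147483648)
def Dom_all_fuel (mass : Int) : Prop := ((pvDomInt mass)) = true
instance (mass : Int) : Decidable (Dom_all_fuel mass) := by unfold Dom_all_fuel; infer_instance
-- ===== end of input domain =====

-- B replaces A's while loop (with its dead else branch) by a recursive helper threading
-- the fuel-of-fuel recurrence; objective: simpler.

-- ===== PORT A =====
-- math.floor(mass/3) equals floor division by 3 exactly for |mass| ≤ 2^31 (the float
-- quotient's error is far below the 1/3 distance to the next integer), ported as floordiv.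
def fuel_calculator (mass : Int) : Int := PySem.Int.floordiv mass 3 - 2

theorem fuel_calculator_lt (a : Int) (h : 0 < a) : fuel_calculator a < a := by
  unfold fuel_calculator
  rw [PySem.Int.floordiv_eq_ediv_of_pos (by omega)]
  have := Int.ediv_le_self 3 (le_of_lt h)
  omega

theorem fuel_calculator_toNat_lt (a : Int) (h : 0 < a) :
    (fuel_calculator a).toNat < a.toNat := by
  have := fuel_calculator_lt a h
  omega

-- the while loop: state (total, additional)
def all_fuel_loop (total additional : Int) : Int :=
  if h : additional > 0 then
    all_fuel_loop (total + additional) (fuel_calculator additional)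
  else
    total
termination_by additional.toNat
decreasing_by exact fuel_calculator_toNat_lt additional h

def all_fuel (mass : Int) : Int :=
  let original := fuel_calculator mass
  let total := original
  let additional := fuel_calculator original
  all_fuel_loop total additional

-- ===== PORT B =====
def fuel_calculator_b (mass : Int) : Int := PySem.Int.floordiv mass 3 - 2

theorem fuel_calculator_b_pos_lt (x : Int) (h : 0 < fuel_calculator_b x) :
    (fuel_calculator_b x).toNat < x.toNat := by
  have hx : 0 < x := by
    by_contra hx
    unfold fuel_calculator_b at h
    have : PySem.Int.floordiv x 3 ≤ 0 := by
      rw [PySem.Int.floordiv_eq_ediv_of_pos (by omega)]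
      have h03 : (0:Int) / 3 = 0 := by decide
      have := Int.ediv_le_ediv (c := 3) (by omega) (show x ≤ 0 by omega)
      omega
    omega
  have : fuel_calculator_b x < x := by
    unfold fuel_calculator_b
    rw [PySem.Int.floordiv_eq_ediv_of_pos (by omega)]
    have := Int.ediv_le_self 3 (le_of_lt hx)
    omega
  omega

def all_fuel_rest (x : Int) : Int :=
  let f := fuel_calculator_b x
  if h : f > 0 then f + all_fuel_rest f else 0
termination_by x.toNat
decreasing_by exact fuel_calculator_b_pos_lt x h

def all_fuel_alt (mass : Int) : Int :=
  let original := fuel_calculator_b mass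
  original + all_fuel_rest original

-- ===== PRECONDITION & SPEC =====
def Spec_all_fuel (mass : Int) (out : Int) : Prop := out = all_fuel_alt mass
instance (mass : Int) (out : Int) : Decidable (Spec_all_fuel mass out) := by unfold Spec_all_fuel; infer_instance

-- ===== CLAIM (what is proved, stated in full; the proofs are below) =====
def Claim_equal_all_fuel : Prop := ∀ (mass : Int), Dom_all_fuel mass → Spec_all_fuel mass (all_fuel mass)

-- ===== LEMMAS AND PROOFS =====

theorem fuel_eq (x : Int) : fuel_calculator x = fuel_calculator_b x := rfl

-- the loop started at additional = fuel x accumulates exactly t + all_fuel_rest x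
theorem loop_eq_rest (n : Nat) : ∀ (x : Int), x.toNat ≤ n → ∀ (t : Int),
    all_fuel_loop t (fuel_calculator x) = t + all_fuel_rest x := by
  induction n with
  | zero =>
    intro x hx t
    rw [all_fuel_loop, all_fuel_rest]
    by_cases h : fuel_calculator_b x > 0
    · exact absurd (fuel_calculator_b_pos_lt x h) (by omega)
    · simp [fuel_eq, h]
  | succ n ih =>
    intro x hx t
    rw [all_fuel_loop, all_fuel_rest]
    by_cases h : fuel_calculator_b x > 0
    · simp only [fuel_eq, h, dif_pos]
      rw [← fuel_eq (fuel_calculator_b x)]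
      rw [ih (fuel_calculator_b x) (by have := fuel_calculator_b_pos_lt x h; omega)]
      ring
    · simp [fuel_eq, h]

-- ===== VERDICT (by name: the statement is the Claim_ definition above) =====
theorem all_fuel_spec : Claim_equal_all_fuel := by
  unfold Claim_equal_all_fuel
  intro mass _
  show all_fuel mass = all_fuel_alt mass
  unfold all_fuel all_fuel_alt
  exact loop_eq_rest (fuel_calculator mass).toNat (fuel_calculator mass) le_rfl _
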